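-- pv_equiv track=rewrite | github.com/ArtinZer0/Voice-Asistant | gui_speech_recognition.py | foo2
-- ===== SOURCE A (Python) =====
-- def foo2(text):
--     try:
--         x = text.split()
--         n = 0
--         a = None
--         b = None
--         for i in x:
--             if i == 'and':
--                 n += 1
--             if i.isdigit() and n == 0:
--                 a = int(i)
--             elif i.isdigit() and n>0:
--                 b = int(i)
--         return [a,b]
--     except:
--         pass
-- ===== SOURCE B (Python) =====
-- def foo2(text):
--     try:
--         tokens = text.split()
--         if 'and' in tokens:
--             idx = tokens.index('and')
--             before, after = tokens[:idx], tokens[idx + 1:]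
--         else:
--             before, after = tokens, []
--         a = next((int(t) for t in reversed(before) if t.isdigit()), None)
--         b = next((int(t) for t in reversed(after) if t.isdigit()), None)
--         return [a, b]
--     except:
--         pass
-- ===== Notes on version B (the rewrite author's own statement) =====
-- stated objective: alternative
-- what changed: B partitions the token list at the first occurrence of the separator token and takes the last digit token of each sublist via a reversed scan, instead of threading a counter state flag through one forward pass.
import Mathlib
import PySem

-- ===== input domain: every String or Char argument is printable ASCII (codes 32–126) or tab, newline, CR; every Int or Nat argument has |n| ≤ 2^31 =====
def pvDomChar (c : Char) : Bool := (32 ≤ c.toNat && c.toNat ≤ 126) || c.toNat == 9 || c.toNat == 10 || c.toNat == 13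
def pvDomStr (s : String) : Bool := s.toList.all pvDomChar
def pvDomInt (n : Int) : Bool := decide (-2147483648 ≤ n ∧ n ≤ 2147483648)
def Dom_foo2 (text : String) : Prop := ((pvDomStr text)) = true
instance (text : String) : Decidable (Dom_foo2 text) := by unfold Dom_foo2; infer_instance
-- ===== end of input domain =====

-- B partitions the token list at the first 'and' and scans each sublist from the end
-- for the last digit token, instead of threading an 'and'-counter flag through one pass.

-- ===== PORT A =====
-- one iteration of A's for-loop over state (n, a, b)
def foo2Step (s : Int × Option Int × Option Int) (i : String) : Int × Option Int × Option Int :=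
  let n : Int := if i == "and" then s.1 + 1 else s.1
  if PySem.Str.strIsdigit i && decide (n = 0) then (n, PySem.Int.ofStr? i, s.2.2)
  else if PySem.Str.strIsdigit i && decide (n > 0) then (n, s.2.1, PySem.Int.ofStr? i)
  else (n, s.2.1, s.2.2)

def foo2 (text : String) : Option (List (Option Int)) :=
  let x := PySem.Str.split₀ text
  let s := x.foldl foo2Step (0, none, none)
  some [s.2.1, s.2.2]

-- ===== PORT B =====
-- last digit token of a sublist, converted with int()
def foo2Last (l : List String) : Option Int :=
  (l.reverse.find? (fun t => PySem.Str.strIsdigit t)).bind (fun t => PySem.Int.ofStr? t)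

def foo2_alt (text : String) : Option (List (Option Int)) :=
  let tokens := PySem.Str.split₀ text
  let p : List String × List String :=
    match tokens.findIdx? (fun t => t == "and") with
    | some idx => (tokens.take idx, tokens.drop (idx + 1))
    | none => (tokens, [])
  some [foo2Last p.1, foo2Last p.2]

-- ===== PRECONDITION & SPEC =====
def Spec_foo2 (text : String) (out : Option (List (Option Int))) : Prop := out = foo2_alt text
instance (text : String) (out : Option (List (Option Int))) : Decidable (Spec_foo2 text out) := by unfold Spec_foo2; infer_instance

-- ===== CLAIM (what is proved, stated in full; the proofs are below) =====
def Claim_equal_foo2 : Prop := ∀ (text : String), Dom_foo2 text → Spec_foo2 text (foo2 text)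

-- ===== LEMMAS AND PROOFS =====

-- value of the a-slot after scanning l with initial value a0 (spec form of foo2Last)
def foo2LastD (l : List String) (a0 : Option Int) : Option Int :=
  ((l.reverse.find? (fun t => PySem.Str.strIsdigit t)).map (fun t => PySem.Int.ofStr? t)).getD a0

theorem foo2LastD_cons (i : String) (l : List String) (a0 : Option Int) :
    foo2LastD (i :: l) a0
      = foo2LastD l (if PySem.Str.strIsdigit i then PySem.Int.ofStr? i else a0) := by
  simp only [foo2LastD, List.reverse_cons, List.find?_append]
  cases h : (l.reverse.find? (fun t => PySem.Str.strIsdigit t)) with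
  | some t => simp [h]
  | none =>
    simp only [Option.none_or]
    by_cases hd : PySem.Chars.strIsdigit i.toList = true <;>
      simp [PySem.Str.strIsdigit, hd, List.find?]

theorem foo2LastD_eq_last (l : List String) : foo2LastD l none = foo2Last l := by
  simp only [foo2LastD, foo2Last]
  cases h : (l.reverse.find? (fun t => PySem.Str.strIsdigit t)) <;> simp [h]

-- before the first 'and': n stays 0, b is never written, a accumulates the last digit
theorem foldl_no_and (l : List String) (a0 b0 : Option Int) (h : "and" ∉ l) :
    l.foldl foo2Step (0, a0, b0) = (0, foo2LastD l a0, b0) := by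
  induction l generalizing a0 with
  | nil => simp [foo2LastD]
  | cons i l ih =>
    have hi : i ≠ "and" := fun e => h (e ▸ List.mem_cons_self)
    have hl : "and" ∉ l := fun e => h (List.mem_cons_of_mem _ e)
    rw [foo2LastD_cons]
    by_cases hd : PySem.Chars.strIsdigit i.toList = true <;>
      simp [List.foldl_cons, foo2Step, PySem.Str.strIsdigit, hi, hd, ih _ hl]

-- after an 'and': n stays positive, a is never written, b accumulates the last digit
theorem foldl_pos (l : List String) (n0 : Int) (a0 b0 : Option Int) (h : 0 < n0) :
    ∃ n1, 0 < n1 ∧ l.foldl foo2Step (n0, a0, b0) = (n1, a0, foo2LastD l b0) := by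
  induction l generalizing n0 b0 with
  | nil => exact ⟨n0, h, by simp [foo2LastD]⟩
  | cons i l ih =>
    rw [foo2LastD_cons]
    by_cases ha : i == "and"
    · by_cases hd : PySem.Chars.strIsdigit i.toList = true
      · obtain ⟨n1, h1, e⟩ := ih (n0 + 1) (PySem.Int.ofStr? i) (by omega)
        refine ⟨n1, h1, ?_⟩
        have hne : ¬ (n0 + 1 = 0) := by omega
        have hpos : (0:Int) < n0 + 1 := by omega
        simpa [List.foldl_cons, foo2Step, PySem.Str.strIsdigit, ha, hd, hne, hpos] using e
      · obtain ⟨n1, h1, e⟩ := ih (n0 + 1) b0 (by omega)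
        exact ⟨n1, h1, by
          simpa [List.foldl_cons, foo2Step, PySem.Str.strIsdigit, ha, hd] using e⟩
    · by_cases hd : PySem.Chars.strIsdigit i.toList = true
      · obtain ⟨n1, h1, e⟩ := ih n0 (PySem.Int.ofStr? i) h
        refine ⟨n1, h1, ?_⟩
        have hne : ¬ (n0 = 0) := by omega
        simpa [List.foldl_cons, foo2Step, PySem.Str.strIsdigit, ha, hd, hne, h] using e
      · obtain ⟨n1, h1, e⟩ := ih n0 b0 h
        exact ⟨n1, h1, by
          simpa [List.foldl_cons, foo2Step, PySem.Str.strIsdigit, ha, hd] using e⟩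

theorem strIsdigit_and : PySem.Chars.strIsdigit ['a','n','d'] = false := by decide

-- ===== VERDICT (by name: the statement is the Claim_ definition above) =====
theorem foo2_spec : Claim_equal_foo2 := by
  intro text _
  unfold Spec_foo2 foo2 foo2_alt
  set tokens := PySem.Str.split₀ text with htok
  cases hidx : tokens.findIdx? (fun t => t == "and") with
  | none =>
    have hnot : "and" ∉ tokens := by
      intro hm
      have := List.findIdx?_eq_none_iff.mp hidx "and" hm
      simp at this
    simp only [hidx]
    rw [foldl_no_and tokens none none hnot, foo2LastD_eq_last]
    simp [foo2Last]
  | some idx =>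
    obtain ⟨hlt, hp, hprev⟩ := List.findIdx?_eq_some_iff_getElem.mp hidx
    have hget : tokens[idx] = "and" := by simpa using hp
    have hbefore : "and" ∉ tokens.take idx := by
      intro hm
      obtain ⟨j, hj, hjget⟩ := List.mem_iff_getElem.mp hm
      have hjlt : j < idx := by
        rw [List.length_take] at hj
        omega
      have := hprev j hjlt
      rw [List.getElem_take] at hjget
      simp [hjget] at this
    have hsplit : tokens = tokens.take idx ++ "and" :: tokens.drop (idx + 1) := by
      conv_lhs => rw [← List.take_append_drop idx tokens]
      rw [← List.getElem_cons_drop hlt, hget]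
    simp only [hidx]
    conv_lhs => rw [hsplit]
    rw [List.foldl_append, foldl_no_and _ none none hbefore, List.foldl_cons]
    have hstep : foo2Step (0, foo2LastD (tokens.take idx) none, none) "and"
        = (1, foo2LastD (tokens.take idx) none, none) := by
      simp [foo2Step, strIsdigit_and]
    rw [hstep]
    obtain ⟨n1, _, e⟩ := foldl_pos (tokens.drop (idx + 1)) 1
      (foo2LastD (tokens.take idx) none) none (by omega)
    rw [e, foo2LastD_eq_last, foo2LastD_eq_last]
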